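-- pv_equiv track=rewrite | github.com/pythoneer-sp/3-Months-DSA-Challenge | Day 7/N_digit_num_with_inc_order.py | increasingNumbers
-- ===== SOURCE A (Python) =====
-- def increasingNumbers(n):
--     res=[] #result array
--     #Handling the case for n=1
--     if n==1:
--         res=[i for i in range(10)]
--         return res
--     #Array for containg digit
--     arr=[]
--     def solve(arr,res,n):
--         #Base condition
--         if n==0:
--             ans=0
--             for i in range(len(arr)):
--                 ans=ans*10+arr[i]
--             res.append(ans)
--             return
--         #Handling large choices
--         for i in range(1,10):
--             # controlled recursion
--             if len(arr)==0 or i>arr[-1]: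
--                 arr.append(i)
--                 solve(arr,res,n-1)
--
--                 # backtrack
--                 arr.pop()
--     solve(arr,res,n)
--     return res
-- ===== SOURCE B (Python) =====
-- def increasingNumbers(n):
--     if n == 1:
--         return list(range(10))
--     if n < 0:
--         return []
--     # breadth-first level building: each level holds (value, last digit) pairs
--     level = [(0, 0)]
--     for _ in range(n):
--         if not level:
--             break
--         level = [(v * 10 + d, d) for (v, last) in level for d in range(last + 1, 10)]
--     return [v for (v, _) in level]
-- ===== Notes on version B (the rewrite author's own statement) =====
-- stated objective: alternative
-- what changed: Replaces the recursive backtracking over a shared digit array with an iterative breadth-first level construction: a list of (value, last-digit) pairs is extended n times by a comprehension (stopping early once empty), so there is no recursion and no mutation/backtracking.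
import Mathlib
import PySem

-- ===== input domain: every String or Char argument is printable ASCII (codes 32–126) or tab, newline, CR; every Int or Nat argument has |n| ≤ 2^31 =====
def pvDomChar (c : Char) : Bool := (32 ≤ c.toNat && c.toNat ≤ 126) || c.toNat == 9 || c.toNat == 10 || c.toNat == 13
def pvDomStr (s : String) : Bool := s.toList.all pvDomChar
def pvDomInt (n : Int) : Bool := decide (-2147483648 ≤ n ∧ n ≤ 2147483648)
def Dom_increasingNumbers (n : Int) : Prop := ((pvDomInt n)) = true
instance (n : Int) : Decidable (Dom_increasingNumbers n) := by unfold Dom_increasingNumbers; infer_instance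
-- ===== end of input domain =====

-- B replaces A's recursive backtracking over a shared digit array by an iterative
-- breadth-first level construction; the return values are proved equal on all inputs.

-- ===== PORT A =====
-- solve(arr,res,n): recursion on n with backtracking over arr. The dite guard
-- 'arr.length < 10' exists only for Lean termination (10 - arr.length decreases);
-- it is always true on the arrs the Python ever builds (strictly increasing digits 1..9),
-- so the port computes exactly what the Python computes — including returning [] for n < 0,
-- where the Python recursion exhausts the 9 digits without ever reaching the n==0 base.
def pvSolveA (arr : List Int) (n : Int) : List Int :=
  if n = 0 then
    -- ans = 0; for i in range(len(arr)): ans = ans*10 + arr[i]; res.append(ans)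
    [(PySem.List.pyRange 0 (arr.length : Int) 1).foldl
      (fun ans i => ans * 10 + PySem.List.pyGetD arr i 0) 0]
  else
    -- for i in range(1,10): if len(arr)==0 or i>arr[-1]: arr.append(i); solve(...); arr.pop()
    (PySem.List.pyRange 1 10 1).flatMap (fun i =>
      if arr.length = 0 ∨ PySem.List.pyGetD arr (-1) 0 < i then
        if _h : arr.length < 10 then pvSolveA (arr ++ [i]) (n - 1) else []
      else [])
termination_by 10 - arr.length
decreasing_by simp; omega

def increasingNumbers (n : Int) : List Int :=
  if n = 1 then PySem.List.pyRange 0 10 1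
  else pvSolveA [] n

-- ===== PORT B =====
def pvStep (level : List (Int × Int)) : List (Int × Int) :=
  level.flatMap (fun p =>
    (PySem.List.pyRange (p.2 + 1) 10 1).map (fun d => (p.1 * 10 + d, d)))

def increasingNumbers_alt (n : Int) : List Int :=
  if n = 1 then PySem.List.pyRange 0 10 1
  else if n < 0 then []
  else -- for _ in range(n): if not level: break; level = [...]  (the break: an empty level stays empty)
    (((List.range n.toNat).foldl (fun lv _ => if lv = [] then lv else pvStep lv) [(0, 0)]).map Prod.fst)

-- ===== PRECONDITION & SPEC =====
def Spec_increasingNumbers (n : Int) (out : List Int) : Prop := out = increasingNumbers_alt n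
instance (n : Int) (out : List Int) : Decidable (Spec_increasingNumbers n out) := by unfold Spec_increasingNumbers; infer_instance

-- ===== CLAIM (what is proved, stated in full; the proofs are below) =====
def Claim_equal_increasingNumbers : Prop := ∀ (n : Int), Dom_increasingNumbers n → Spec_increasingNumbers n (increasingNumbers n)

-- ===== LEMMAS AND PROOFS =====

-- common recursive description: pvG n v last = numbers obtained by appending n more
-- strictly increasing digits (each in 1..9, > last) to the prefix of value v
def pvG : Nat → Int → Int → List Int
  | 0, v, _ => [v]
  | n + 1, v, last =>
      (PySem.List.pyRange 1 10 1).flatMap (fun i =>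
        if last < i then pvG n (v * 10 + i) i else [])

-- the last digit of arr as A's guard reads it, 0 for the empty array
def pvLastv (arr : List Int) : Int := if arr = [] then 0 else PySem.List.pyGetD arr (-1) 0

theorem pvFlatMap_congr {α β : Type} (l : List α) (f g : α → List β)
    (h : ∀ x ∈ l, f x = g x) : l.flatMap f = l.flatMap g := by
  induction l with
  | nil => rfl
  | cons a t ih =>
      simp only [List.flatMap_cons]
      rw [h a (by simp), ih (fun x hx => h x (by simp [hx]))]

theorem pvFoldVal (arr : List Int) :
    (PySem.List.pyRange 0 (arr.length : Int) 1).foldl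
      (fun ans i => ans * 10 + PySem.List.pyGetD arr i 0) 0
    = arr.foldl (fun ans d => ans * 10 + d) 0 := by
  simpa using PySem.List.foldl_pyRange_zero_pyGetD arr 0 (fun ans d => ans * 10 + d) 0

theorem pvLastv_append (arr : List Int) (i : Int) : pvLastv (arr ++ [i]) = i := by
  have hne : arr ++ [i] ≠ [] := by simp
  rw [pvLastv, if_neg hne]
  have hl : (arr ++ [i]).length = arr.length + 1 := by simp
  simp [PySem.List.pyGetD, PySem.List.pyGet?, PySem.List.pyIdx?, hl]

-- A returns nothing for negative n: the base case n = 0 is never reached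
theorem pvSolveA_neg : ∀ (fuel : Nat) (arr : List Int) (n : Int),
    10 - arr.length ≤ fuel → n < 0 → pvSolveA arr n = [] := by
  intro fuel
  induction fuel with
  | zero =>
      intro arr n hf hn
      rw [pvSolveA, if_neg (by omega)]
      have h10 : ¬ arr.length < 10 := by omega
      rw [pvFlatMap_congr _ _ (fun _ => []) ?_]
      · simp
      · intro i _
        by_cases hc : (arr.length = 0 ∨ PySem.List.pyGetD arr (-1) 0 < i)
        · rw [if_pos hc, dif_neg h10]
        · rw [if_neg hc]
  | succ fuel ih =>
      intro arr n hf hn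
      rw [pvSolveA, if_neg (by omega)]
      rw [pvFlatMap_congr _ _ (fun _ => []) ?_]
      · simp
      · intro i _
        by_cases hc : (arr.length = 0 ∨ PySem.List.pyGetD arr (-1) 0 < i)
        · rw [if_pos hc]
          by_cases hlt : arr.length < 10
          · rw [dif_pos hlt]
            exact ih (arr ++ [i]) (n - 1) (by simp; omega) (by omega)
          · rw [dif_neg hlt]
        · rw [if_neg hc]

-- A's recursion depends on arr only through its folded value and last digit;
-- the invariant arr.length ≤ pvLastv arr ≤ 9 keeps the termination guard true
theorem pvSolveA_eq_g : ∀ (m : Nat) (arr : List Int),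
    (arr.length : Int) ≤ pvLastv arr → pvLastv arr ≤ 9 →
    pvSolveA arr (m : Int) = pvG m (arr.foldl (fun ans d => ans * 10 + d) 0) (pvLastv arr) := by
  intro m
  induction m with
  | zero => intro arr _ _; rw [pvSolveA]; simp [pvG, pvFoldVal]
  | succ m ih =>
      intro arr hlen h9
      rw [pvSolveA, if_neg (by omega)]
      have hm : ((m : Int) + 1) - 1 = (m : Int) := by omega
      simp only [Nat.cast_succ, hm, pvG]
      apply pvFlatMap_congr
      intro i hi
      obtain ⟨hi1, hi2⟩ := PySem.List.mem_pyRange_one.mp hi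
      have hguard : (arr.length = 0 ∨ PySem.List.pyGetD arr (-1) 0 < i) ↔ pvLastv arr < i := by
        rw [pvLastv]
        split_ifs with he
        · subst he; simp; omega
        · have : ¬ arr.length = 0 := by simpa [List.length_eq_zero_iff] using he
          tauto
      by_cases hg : pvLastv arr < i
      · rw [if_pos (hguard.mpr hg), if_pos hg, dif_pos (by omega)]
        rw [ih (arr ++ [i]) ?_ ?_]
        · rw [pvLastv_append]; simp
        · rw [pvLastv_append]; simp; omega
        · rw [pvLastv_append]; omega
      · rw [if_neg (fun h => hg (hguard.mp h)), if_neg hg]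

-- B side: the last digits appearing in a level are ≥ 0, so pyRange (last+1) 10 1
-- is exactly the filter of 1..9 by (last < ·)
theorem pvRange_filter (last : Int) (h : 0 ≤ last) :
    PySem.List.pyRange (last + 1) 10 1
      = (PySem.List.pyRange 1 10 1).filter (fun i => decide (last < i)) := by
  by_cases h9 : last ≤ 8
  · interval_cases last <;> decide
  · have h1 : PySem.List.pyRange (last + 1) 10 1 = [] :=
      PySem.List.pyRange_one_eq_nil (by omega)
    rw [h1]
    symm
    rw [List.filter_eq_nil_iff]
    intro i hi
    have := PySem.List.mem_pyRange_one.mp hi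
    simp only [decide_eq_true_eq]
    omega

theorem pvFlatMap_filter {α β : Type} (l : List α) (p : α → Bool) (f : α → List β) :
    (l.filter p).flatMap f = l.flatMap (fun x => if p x then f x else []) := by
  induction l with
  | nil => rfl
  | cons a t ih =>
      by_cases h : p a = true <;> simp [h, ih]

theorem pvIterate_eq_g : ∀ (n : Nat) (l : List (Int × Int)),
    (∀ p ∈ l, 0 ≤ p.2) →
    (pvStep^[n] l).map Prod.fst = l.flatMap (fun p => pvG n p.1 p.2) := by
  intro n
  induction n with
  | zero =>
      intro l hl0
      simp only [Function.iterate_zero, id_eq, pvG]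
      induction l with
      | nil => rfl
      | cons a t iht =>
          simp only [List.map_cons, List.flatMap_cons, List.singleton_append]
          rw [iht (fun p hp => hl0 p (List.mem_cons_of_mem a hp))]
  | succ n ih =>
      intro l hl
      rw [Function.iterate_succ_apply]
      rw [ih (pvStep l) ?hpos]
      case hpos =>
        intro p hp
        simp only [pvStep, List.mem_flatMap] at hp
        obtain ⟨q, hql, hq⟩ := hp
        have hq2 := hl q hql
        simp only [List.mem_map] at hq
        obtain ⟨d, hd, hdq⟩ := hq
        obtain ⟨hd1, hd2⟩ := PySem.List.mem_pyRange_one.mp hd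
        subst hdq
        simp only
        omega
      -- (pvStep l).flatMap (g n) = l.flatMap (g (n+1))
      simp only [pvStep]
      rw [List.flatMap_assoc]
      apply pvFlatMap_congr
      intro p hp
      have hp2 : 0 ≤ p.2 := hl p hp
      show ((PySem.List.pyRange (p.2 + 1) 10 1).map fun d => (p.1 * 10 + d, d)).flatMap
            (fun q => pvG n q.1 q.2) = pvG (n + 1) p.1 p.2
      rw [List.flatMap_map]
      rw [pvRange_filter p.2 hp2, pvFlatMap_filter]
      simp only [pvG]
      apply pvFlatMap_congr
      intro i _
      by_cases h : p.2 < i <;> simp [h]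

theorem pvFoldl_range_eq_iterate (n : Nat) (l : List (Int × Int)) :
    (List.range n).foldl (fun lv _ => if lv = [] then lv else pvStep lv) l = pvStep^[n] l := by
  induction n with
  | zero => rfl
  | succ n ih =>
      rw [List.range_succ, List.foldl_append, ih]
      rw [Function.iterate_succ_apply']
      simp only [List.foldl_cons, List.foldl_nil]
      split_ifs with h
      · rw [h]; rfl
      · rfl

-- ===== VERDICT (by name: the statement is the Claim_ definition above) =====
theorem increasingNumbers_spec : Claim_equal_increasingNumbers := by
  intro n _
  unfold Spec_increasingNumbers increasingNumbers increasingNumbers_alt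
  by_cases h1 : n = 1
  · simp [h1]
  · rw [if_neg h1, if_neg h1]
    by_cases hneg : n < 0
    · rw [if_pos hneg]
      exact pvSolveA_neg 10 [] n (by simp) hneg
    · rw [if_neg hneg]
      rw [pvFoldl_range_eq_iterate]
      rw [pvIterate_eq_g n.toNat [(0, 0)] (by intro p hp; simp at hp; simp [hp])]
      have hn : ((n.toNat : Nat) : Int) = n := Int.toNat_of_nonneg (by omega)
      rw [show pvSolveA [] n = pvSolveA [] ((n.toNat : Nat) : Int) from by rw [hn]]
      rw [pvSolveA_eq_g n.toNat [] (by simp [pvLastv]) (by simp [pvLastv])]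
      simp [pvLastv]
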